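-- pv_equiv track=rewrite | github.com/Jeffnicht/Python-Redis | tests/RPUSHtest.py | parse_resp_array
-- ===== SOURCE A (Python) =====
-- def parse_resp_array(resp: str) -> list:
--     """Parse a RESP array string into a Python list of strings."""
--     lines = resp.replace("\r\n", "\n").split("\n")
--     result = []
--     i = 0
--     while i < len(lines):
--         if lines[i].startswith("$") and i + 1 < len(lines):
--             result.append(lines[i + 1])
--             i += 2
--         else:
--             i += 1
--     return result
-- ===== SOURCE B (Python) =====
-- def parse_resp_array(resp: str) -> list:
--     """Parse a RESP array string into a Python list of strings."""
--     def go(lines):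
--         if len(lines) < 2:
--             return []
--         if lines[0].startswith("$"):
--             return [lines[1]] + go(lines[2:])
--         return go(lines[1:])
--     return go(resp.replace("\r\n", "\n").split("\n"))
-- ===== Notes on version B (the rewrite author's own statement) =====
-- stated objective: simpler
-- what changed: The index-based while loop with a mutable counter and manual i+1/i+2 bookkeeping is replaced by a direct structural recursion on the list of lines that consumes two lines per '$' header and one otherwise, building the result front-to-back with no index arithmetic or accumulator.
import Mathlib
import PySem

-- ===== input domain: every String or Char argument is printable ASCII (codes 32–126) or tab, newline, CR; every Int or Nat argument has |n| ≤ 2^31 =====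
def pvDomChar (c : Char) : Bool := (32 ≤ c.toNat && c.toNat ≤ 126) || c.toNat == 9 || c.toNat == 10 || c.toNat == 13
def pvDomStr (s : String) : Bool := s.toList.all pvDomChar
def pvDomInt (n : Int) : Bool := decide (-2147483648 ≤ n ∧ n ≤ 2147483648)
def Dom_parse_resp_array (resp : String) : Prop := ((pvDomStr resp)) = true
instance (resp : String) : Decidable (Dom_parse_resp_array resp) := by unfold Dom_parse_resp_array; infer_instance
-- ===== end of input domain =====

-- B replaces A's index-based while loop (mutable i, i+1/i+2 skips) by a structural
-- recursion on the list of lines; same O(n) cost, simpler decomposition.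

-- ===== PORT A =====
-- A's while loop over index i with accumulator `result`
def pvLoopA (lines : List String) (i : Nat) (result : List String) : List String :=
  if _h : i < lines.length then
    if PySem.Str.startswith (lines.getD i "") "$" ∧ i + 1 < lines.length then
      pvLoopA lines (i + 2) (result ++ [lines.getD (i + 1) ""])
    else
      pvLoopA lines (i + 1) result
  else
    result
termination_by lines.length - i

def parse_resp_array (resp : String) : List String :=
  let lines := (PySem.Str.split? (PySem.Str.replace resp "\r\n" "\n") "\n").getD []
  pvLoopA lines 0 []

-- ===== PORT B =====
-- B's recursion `go` over the list of lines
def pvGoB : List String → List String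
  | [] => []
  | [_] => []
  | a :: b :: rest =>
    if PySem.Str.startswith a "$" then b :: pvGoB rest else pvGoB (b :: rest)

def parse_resp_array_alt (resp : String) : List String :=
  pvGoB ((PySem.Str.split? (PySem.Str.replace resp "\r\n" "\n") "\n").getD [])

-- ===== PRECONDITION & SPEC =====
def Spec_parse_resp_array (resp : String) (out : List String) : Prop := out = parse_resp_array_alt resp
instance (resp : String) (out : List String) : Decidable (Spec_parse_resp_array resp out) := by unfold Spec_parse_resp_array; infer_instance

-- ===== CLAIM (what is proved, stated in full; the proofs are below) =====
def Claim_equal_parse_resp_array : Prop := ∀ (resp : String), Dom_parse_resp_array resp → Spec_parse_resp_array resp (parse_resp_array resp)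

-- ===== LEMMAS AND PROOFS =====

-- A's loop from position i equals `result` followed by B's recursion on the remaining lines.
theorem pvLoopA_eq_go (lines : List String) (i : Nat) (result : List String) :
    pvLoopA lines i result = result ++ pvGoB (lines.drop i) := by
  induction i, result using pvLoopA.induct (lines := lines) with
  | case1 i result h hc ih =>
    have h1 : i + 1 < lines.length := hc.2
    have eA : lines.getD i "" = lines[i] := by
      simp [List.getD, List.getElem?_eq_getElem h]
    rw [pvLoopA, dif_pos h, if_pos hc, ih,
        List.drop_eq_getElem_cons (l := lines) (by omega : i < lines.length),
        List.drop_eq_getElem_cons (l := lines) h1]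
    have e2 : i + 1 + 1 = i + 2 := by omega
    rw [e2, pvGoB]
    rw [eA] at hc
    rw [if_pos hc.1]
    simp [List.getD, List.getElem?_eq_getElem h1]
  | case2 i result h hc ih =>
    have eA : lines.getD i "" = lines[i] := by
      simp [List.getD, List.getElem?_eq_getElem h]
    rw [pvLoopA, dif_pos h, if_neg hc, ih,
        List.drop_eq_getElem_cons (l := lines) (by omega : i < lines.length)]
    by_cases h1 : i + 1 < lines.length
    · -- startswith failed (since i+1 < length)
      rw [List.drop_eq_getElem_cons (l := lines) h1, pvGoB]
      have hs : ¬ PySem.Str.startswith lines[i] "$" = true := fun hst =>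
        hc ⟨by rw [eA]; exact hst, h1⟩
      rw [if_neg hs, ← List.drop_eq_getElem_cons (l := lines) h1]
    · -- i is the last line
      have hnil : lines.drop (i+1) = [] := List.drop_eq_nil_of_le (by omega)
      rw [hnil, pvGoB, pvGoB]
  | case3 i result h =>
    rw [pvLoopA, dif_neg h, List.drop_eq_nil_of_le (by omega), pvGoB]
    simp

-- ===== VERDICT (by name: the statement is the Claim_ definition above) =====
theorem parse_resp_array_spec : Claim_equal_parse_resp_array := by
  intro resp _
  unfold Spec_parse_resp_array parse_resp_array parse_resp_array_alt
  simpa using pvLoopA_eq_go _ 0 []
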